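-- pv_equiv track=rewrite | github.com/vadolaxt/Python-Fundamental | test/Lab1/Task5.py | taxi_fare
-- ===== SOURCE A (Python) =====
-- def taxi_fare(d, t):
--     sum=0
--     fee=0
--     for i in range(0,d+1):
--         if(d<=1):
--             fee=10000
--             sum+=fee
--         elif(d>1 and d<=10):
--             fee=5000
--             sum+=fee
--         else:
--             fee=1000
--             sum+=fee
--     return sum +t*1000
-- ===== SOURCE B (Python) =====
-- def taxi_fare(d, t):
--     if d < 0:
--         base = 0
--     elif d <= 1:
--         base = (d + 1) * 10000
--     elif d <= 10:
--         base = (d + 1) * 5000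
--     else:
--         base = (d + 1) * 1000
--     return base + t * 1000
-- ===== Notes on version B (the rewrite author's own statement) =====
-- stated objective: faster
-- what changed: Replaced the O(d) loop that adds a per-distance-band constant fee d+1 times with the closed-form product (d+1)*fee (0 when d<0), keeping t*1000 unchanged.
import Mathlib
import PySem

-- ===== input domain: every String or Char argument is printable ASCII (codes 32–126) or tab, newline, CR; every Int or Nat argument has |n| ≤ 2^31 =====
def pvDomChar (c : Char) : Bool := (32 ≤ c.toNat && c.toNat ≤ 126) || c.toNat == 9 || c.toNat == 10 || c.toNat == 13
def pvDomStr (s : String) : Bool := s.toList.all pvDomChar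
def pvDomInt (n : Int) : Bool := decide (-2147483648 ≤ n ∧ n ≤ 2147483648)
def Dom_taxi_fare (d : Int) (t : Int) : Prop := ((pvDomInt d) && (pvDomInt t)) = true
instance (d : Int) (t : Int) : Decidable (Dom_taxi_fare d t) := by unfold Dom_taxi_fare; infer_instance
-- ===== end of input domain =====

-- B replaces A's O(d) loop (adding a constant band fee d+1 times) with the closed-form product (d+1)*fee; faster.

-- ===== PORT A =====
-- state is (sum, fee), exactly as in the Python loop
def taxi_fare (d : Int) (t : Int) : Int :=
  let st : Int × Int :=
    (PySem.List.pyRange 0 (d + 1) 1).foldl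
      (fun p _ =>
        if d ≤ 1 then (p.1 + 10000, (10000 : Int))
        else if d > 1 ∧ d ≤ 10 then (p.1 + 5000, 5000)
        else (p.1 + 1000, 1000))
      (0, 0)
  st.1 + t * 1000

-- ===== PORT B =====
def taxi_fare_alt (d : Int) (t : Int) : Int :=
  let base : Int :=
    if d < 0 then 0
    else if d ≤ 1 then (d + 1) * 10000
    else if d ≤ 10 then (d + 1) * 5000
    else (d + 1) * 1000
  base + t * 1000

-- ===== PRECONDITION & SPEC =====
def Spec_taxi_fare (d : Int) (t : Int) (out : Int) : Prop := out = taxi_fare_alt d t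
instance (d : Int) (t : Int) (out : Int) : Decidable (Spec_taxi_fare d t out) := by unfold Spec_taxi_fare; infer_instance

-- ===== CLAIM (what is proved, stated in full; the proofs are below) =====
def Claim_equal_taxi_fare : Prop := ∀ (d : Int) (t : Int), Dom_taxi_fare d t → Spec_taxi_fare d t (taxi_fare d t)

-- ===== LEMMAS AND PROOFS =====

-- folding "add a constant, set fee to it" over any list: first component is init + length * c
theorem foldl_const_add (c : Int) (l : List Int) (p : Int × Int) :
    (l.foldl (fun (q : Int × Int) _ => (q.1 + c, c)) p).1 = p.1 + l.length * c := by
  induction l generalizing p with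
  | nil => simp
  | cons x xs ih => simp [List.foldl, ih]; ring

theorem taxi_fare_closed (d t : Int) :
    taxi_fare d t =
      ((d + 1).toNat : Int) *
        (if d ≤ 1 then 10000 else if d > 1 ∧ d ≤ 10 then 5000 else 1000) + t * 1000 := by
  unfold taxi_fare
  split_ifs <;>
    simp only [foldl_const_add, PySem.List.length_pyRange_one] <;> ring_nf

-- ===== VERDICT (by name: the statement is the Claim_ definition above) =====
theorem taxi_fare_spec : Claim_equal_taxi_fare := by
  intro d t _
  show taxi_fare d t = taxi_fare_alt d t
  rw [taxi_fare_closed]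
  unfold taxi_fare_alt
  by_cases h0 : d < 0
  · simp only [h0]
    have : (d + 1).toNat = 0 := by omega
    simp [this]
  · have hd1 : ((d + 1).toNat : Int) = d + 1 := by omega
    rw [hd1]
    split_ifs with h1 h2 h3 <;> simp_all
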